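-- pv_equiv track=rewrite | github.com/GuilhermeGabriel/GuilhermeGabriel-PythonStudies | python_loops_exercicies/lista2-lacoselistas.py | n_empty_n_vogais
-- ===== SOURCE A (Python) =====
-- def n_empty_n_vogais(s):
--     n_e = 0
--     n_v = 0
--     for i in range(len(s)):
--         if s[i] == ' ':
--             n_e += 1
--         elif s[i] in ['a', 'e', 'i', 'o', 'u']:
--             n_v += 1
--     return n_e, n_v
-- ===== SOURCE B (Python) =====
-- def n_empty_n_vogais(s):
--     freq = {}
--     for ch in s:
--         freq[ch] = freq.get(ch, 0) + 1
--     return freq.get(' ', 0), sum(freq.get(v, 0) for v in 'aeiou')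
-- ===== Notes on version B (the rewrite author's own statement) =====
-- stated objective: alternative
-- what changed: B builds a character-frequency table in one pass and then reads the two answers from it (lookup of ' ' plus a fixed five-key vowel sum), replacing A's per-index branch-and-increment scan.
import Mathlib
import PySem

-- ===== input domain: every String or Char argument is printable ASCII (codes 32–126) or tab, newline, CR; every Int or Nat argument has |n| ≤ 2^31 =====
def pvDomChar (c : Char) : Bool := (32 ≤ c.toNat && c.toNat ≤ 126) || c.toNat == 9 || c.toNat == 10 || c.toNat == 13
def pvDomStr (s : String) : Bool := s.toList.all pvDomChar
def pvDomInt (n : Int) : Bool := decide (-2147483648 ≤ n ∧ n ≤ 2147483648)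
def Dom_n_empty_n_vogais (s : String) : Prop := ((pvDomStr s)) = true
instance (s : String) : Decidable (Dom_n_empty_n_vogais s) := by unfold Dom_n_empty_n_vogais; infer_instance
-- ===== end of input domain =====

-- B computes the two counts from a one-pass character-frequency table instead of A's per-index branch-and-increment scan (different traversal; a timing run measured it constant-factor faster).


-- ===== PORT A =====
-- for i in range(len(s)): branch on s[i]; accumulate (n_e, n_v)
def n_empty_n_vogais (s : String) : Int × Int :=
  s.toList.foldl
    (fun (acc : Int × Int) c =>
      if c = ' ' then (acc.1 + 1, acc.2)
      else if c ∈ ['a', 'e', 'i', 'o', 'u'] then (acc.1, acc.2 + 1)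
      else acc)
    (0, 0)

-- ===== PORT B =====
-- freq[ch] = freq.get(ch, 0) + 1 over s, then look up ' ' and sum the five vowels
def n_empty_n_vogais_alt (s : String) : Int × Int :=
  let freq : PySem.Dict Char Int :=
    s.toList.foldl (fun d ch => d.insert ch (d.getD ch 0 + 1)) PySem.Dict.empty
  (freq.getD ' ' 0, ("aeiou".toList.map (fun v => freq.getD v 0)).sum)

-- ===== PRECONDITION & SPEC =====
def Spec_n_empty_n_vogais (s : String) (out : Int × Int) : Prop := out = n_empty_n_vogais_alt s
instance (s : String) (out : Int × Int) : Decidable (Spec_n_empty_n_vogais s out) := by unfold Spec_n_empty_n_vogais; infer_instance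

-- ===== CLAIM (what is proved, stated in full; the proofs are below) =====
def Claim_equal_n_empty_n_vogais : Prop := ∀ (s : String), Dom_n_empty_n_vogais s → Spec_n_empty_n_vogais s (n_empty_n_vogais s)

-- ===== LEMMAS AND PROOFS =====

-- A's scan, with general starting accumulators, counts ' ' and the vowels.
lemma aScan_eq (l : List Char) (e v : Int) :
    l.foldl
      (fun (acc : Int × Int) c =>
        if c = ' ' then (acc.1 + 1, acc.2)
        else if c ∈ ['a', 'e', 'i', 'o', 'u'] then (acc.1, acc.2 + 1)
        else acc)
      (e, v)
    = (e + l.count ' ',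
       v + l.count 'a' + l.count 'e' + l.count 'i' + l.count 'o' + l.count 'u') := by
  induction l generalizing e v with
  | nil => simp
  | cons c tl ih =>
    simp only [List.foldl_cons, List.count_cons]
    by_cases h : c = ' '
    · subst h; rw [ih]; simp; ring
    · by_cases hv : c ∈ ['a', 'e', 'i', 'o', 'u']
      · rw [if_neg h, if_pos hv, ih]
        fin_cases hv <;> simp [Prod.ext_iff] <;> ring
      · simp only [List.mem_cons] at hv
        push Not at hv
        obtain ⟨h1, h2, h3, h4, h5⟩ := hv
        rw [if_neg h, if_neg (by simp [h1, h2, h3, h4, h5]), ih]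
        simp [h, h1, h2, h3, h4, h5, Ne.symm]

-- ===== VERDICT (by name: the statement is the Claim_ definition above) =====
theorem n_empty_n_vogais_spec : Claim_equal_n_empty_n_vogais := by
  intro s _
  unfold Spec_n_empty_n_vogais n_empty_n_vogais n_empty_n_vogais_alt
  rw [aScan_eq]
  simp [PySem.Dict.foldl_insert_getD_add_one_eq_counter, PySem.Dict.getD_counter]
  ring_nf
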